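-- pv_equiv track=rewrite | github.com/xiao0916/lm-skills | skills/component-analyzer/scripts/pattern_detector.py | _extract_props_pattern
-- ===== SOURCE A (Python) =====
-- from typing import Dict, List, Any, Tuple, Set
--
-- def _extract_props_pattern(components: List[Dict[str, Any]]) -> str:
--     """
--     从组件列表中提取共同的 props 模式
--     """
--     if not components:
--         return "props"
--
--     common_props = set(components[0].get('props', []))
--
--     for comp in components[1:]:
--         props = set(comp.get('props', []))
--         common_props &= props
--
--     if common_props:
--         return "{ " + ", ".join(sorted(common_props)) + " }"
--
--     return "props"
-- ===== SOURCE B (Python) =====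
-- def _extract_props_pattern(components):
--     """Counting re-implementation: tally, for each prop, in how many components'
--     prop-sets it occurs; the common props are those with count == len(components)."""
--     if not components:
--         return "props"
--     counts = {}
--     for comp in components:
--         for p in set(comp.get('props', [])):
--             counts[p] = counts.get(p, 0) + 1
--     common = sorted(p for p, c in counts.items() if c == len(components))
--     if common:
--         return "{ " + ", ".join(common) + " }"
--     return "props"
-- ===== Notes on version B (the rewrite author's own statement) =====
-- stated objective: alternative
-- what changed: Replaces the running set-intersection accumulator with a single occurrence-counting dict: every prop of every component's prop-set is tallied once, and the common props are exactly those whose count equals len(components).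
import Mathlib
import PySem

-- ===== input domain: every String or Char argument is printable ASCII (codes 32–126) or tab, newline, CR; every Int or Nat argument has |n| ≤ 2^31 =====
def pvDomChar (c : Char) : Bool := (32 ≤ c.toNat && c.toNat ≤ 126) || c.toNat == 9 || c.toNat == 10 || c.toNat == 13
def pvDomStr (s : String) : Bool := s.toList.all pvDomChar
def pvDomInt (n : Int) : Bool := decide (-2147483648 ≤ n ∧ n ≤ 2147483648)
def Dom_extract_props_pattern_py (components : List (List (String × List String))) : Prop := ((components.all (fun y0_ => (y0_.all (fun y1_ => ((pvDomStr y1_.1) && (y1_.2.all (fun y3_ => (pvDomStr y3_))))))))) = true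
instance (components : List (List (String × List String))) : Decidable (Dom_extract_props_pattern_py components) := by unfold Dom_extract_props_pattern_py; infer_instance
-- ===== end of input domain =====

-- B replaces A's running set intersection with a one-pass occurrence counter (count = len(components) ⇔ common); alternative decomposition, same cost.

-- shared helper: comp.get('props', []) — first-match lookup on the assoc list (dict convention)
def pvProps (comp : List (String × List String)) : List String :=
  PySem.Dict.getD (PySem.Dict.mk comp) "props" []

-- ===== PORT A =====
def extract_props_pattern_py (components : List (List (String × List String))) : String :=
  match components with
  | [] => "props"
  | c0 :: rest =>
    let common_props : PySem.Set String :=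
      rest.foldl
        (fun acc comp => PySem.Set.inter acc (PySem.Set.ofList (pvProps comp)))
        (PySem.Set.ofList (pvProps c0))
    if common_props ≠ [] then
      "{ " ++ PySem.Str.join ", " (PySem.List.sorted common_props (fun x => x) false) ++ " }"
    else "props"

-- ===== PORT B =====
def extract_props_pattern_py_alt (components : List (List (String × List String))) : String :=
  if components = [] then "props"
  else
    let counts : PySem.Dict String Int :=
      components.foldl
        (fun d comp =>
          (PySem.Set.ofList (pvProps comp)).foldl
            (fun d p => d.modify p 0 (· + 1)) d)
        PySem.Dict.empty
    let common : List String :=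
      PySem.List.sorted
        ((counts.items.filter (fun pc => pc.2 == (components.length : Int))).map (·.1))
        (fun x => x) false
    if common ≠ [] then "{ " ++ PySem.Str.join ", " common ++ " }" else "props"

-- ===== PRECONDITION & SPEC =====
def Spec_extract_props_pattern_py (components : List (List (String × List String))) (out : String) : Prop := out = extract_props_pattern_py_alt components
instance (components : List (List (String × List String))) (out : String) : Decidable (Spec_extract_props_pattern_py components out) := by unfold Spec_extract_props_pattern_py; infer_instance

-- ===== CLAIM (what is proved, stated in full; the proofs are below) =====
def Claim_equal_extract_props_pattern_py : Prop := ∀ (components : List (List (String × List String))), Dom_extract_props_pattern_py components → Spec_extract_props_pattern_py components (extract_props_pattern_py components)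

-- ===== LEMMAS AND PROOFS =====

-- membership in A's running intersection
theorem mem_foldl_inter {x : String} (rest : List (List (String × List String)))
    (acc : PySem.Set String) :
    (x ∈ rest.foldl (fun acc comp => PySem.Set.inter acc (PySem.Set.ofList (pvProps comp))) acc)
    ↔ x ∈ acc ∧ ∀ comp ∈ rest, x ∈ PySem.Set.ofList (pvProps comp) := by
  induction rest generalizing acc with
  | nil => simp
  | cons c t ih =>
    rw [List.foldl_cons, ih]
    simp only [PySem.Set.mem_inter, List.mem_cons]
    constructor
    · rintro ⟨⟨h1, h2⟩, h3⟩
      refine ⟨h1, fun comp hc => ?_⟩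
      rcases hc with rfl | hc
      · exact h2
      · exact h3 comp hc
    · rintro ⟨h1, h2⟩
      exact ⟨⟨h1, h2 c (Or.inl rfl)⟩, fun comp hc => h2 comp (Or.inr hc)⟩

theorem nodup_foldl_inter (rest : List (List (String × List String)))
    (acc : PySem.Set String) (h : acc.Nodup) :
    (rest.foldl (fun acc comp => PySem.Set.inter acc (PySem.Set.ofList (pvProps comp))) acc).Nodup := by
  induction rest generalizing acc with
  | nil => exact h
  | cons c t ih => exact ih _ (PySem.Set.nodup_inter _ _ h)

-- B's counts dict: value at v = number of components whose prop-set contains v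
theorem counts_getD (components : List (List (String × List String)))
    (d : PySem.Dict String Int) (v : String) :
    (components.foldl
        (fun d comp =>
          (PySem.Set.ofList (pvProps comp)).foldl
            (fun d p => d.modify p 0 (· + 1)) d)
        d).getD v 0
    = d.getD v 0 + (components.countP (fun comp => decide (v ∈ PySem.Set.ofList (pvProps comp))) : Int) := by
  induction components generalizing d with
  | nil => simp
  | cons c t ih =>
    rw [List.foldl_cons, ih, PySem.Dict.getD_foldl_modify_add_one, List.countP_cons]
    by_cases hv : v ∈ PySem.Set.ofList (pvProps c)
    · rw [List.count_eq_one_of_mem (PySem.Set.nodup_ofList _) hv]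
      simp only [hv, decide_true, if_pos]
      push_cast
      ring
    · rw [List.count_eq_zero_of_not_mem hv]
      simp only [hv, decide_false]
      push_cast
      ring

theorem counts_keys_nodup (components : List (List (String × List String)))
    (d : PySem.Dict String Int) (h : (PySem.Dict.keys d).Nodup) :
    ((components.foldl
        (fun d comp =>
          (PySem.Set.ofList (pvProps comp)).foldl
            (fun d p => d.modify p 0 (· + 1)) d)
        d).keys).Nodup := by
  induction components generalizing d with
  | nil => exact h
  | cons c t ih =>
    refine ih _ ?_
    rw [PySem.Dict.keys_foldl_modify]
    exact PySem.Set.nodup_update _ _ h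

theorem counts_keys_mem (components : List (List (String × List String)))
    (d : PySem.Dict String Int) (v : String) :
    v ∈ (components.foldl
        (fun d comp =>
          (PySem.Set.ofList (pvProps comp)).foldl
            (fun d p => d.modify p 0 (· + 1)) d)
        d).keys
    ↔ v ∈ d.keys ∨ ∃ comp ∈ components, v ∈ PySem.Set.ofList (pvProps comp) := by
  induction components generalizing d with
  | nil => simp
  | cons c t ih =>
    rw [List.foldl_cons, ih, PySem.Dict.keys_foldl_modify]
    simp only [PySem.Set.mem_update, List.mem_cons]
    constructor
    · rintro (⟨h | h⟩ | ⟨comp, hc, hm⟩)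
      · exact Or.inl h
      · exact Or.inr ⟨c, Or.inl rfl, h⟩
      · exact Or.inr ⟨comp, Or.inr hc, hm⟩
    · rintro (h | ⟨comp, rfl | hc, hm⟩)
      · exact Or.inl (Or.inl h)
      · exact Or.inl (Or.inr hm)
      · exact Or.inr ⟨comp, hc, hm⟩

-- map-fst of a value-filtered (key, value) table is a key filter
theorem pv_map_filter {κ ν : Type} (keys : List κ) (f : κ → ν) (p : ν → Bool) :
    ((keys.map (fun k => (k, f k))).filter (fun pc => p pc.2)).map (·.1)
      = keys.filter (fun k => p (f k)) := by
  induction keys with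
  | nil => rfl
  | cons k t ih => by_cases h : p (f k) <;> simp [h, ih]

-- ===== VERDICT (by name: the statement is the Claim_ definition above) =====
theorem extract_props_pattern_py_spec : Claim_equal_extract_props_pattern_py := by
  intro components _
  unfold Spec_extract_props_pattern_py
  match components with
  | [] => rfl
  | c0 :: rest =>
    simp only [extract_props_pattern_py, extract_props_pattern_py_alt, reduceCtorEq, ite_false]
    set S : PySem.Set String :=
      rest.foldl (fun acc comp => PySem.Set.inter acc (PySem.Set.ofList (pvProps comp)))
        (PySem.Set.ofList (pvProps c0)) with hSdef
    set counts : PySem.Dict String Int :=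
      (c0 :: rest).foldl
        (fun d comp => (PySem.Set.ofList (pvProps comp)).foldl (fun d p => d.modify p 0 (· + 1)) d)
        PySem.Dict.empty with hcounts
    set C : List String :=
      (counts.items.filter (fun pc => pc.2 == (((c0 :: rest).length : Nat) : Int))).map (·.1) with hC
    have hnk : counts.keys.Nodup := by
      rw [hcounts]
      exact counts_keys_nodup _ _ (by simp [PySem.Dict.keys_empty])
    have hCfilter : C = counts.keys.filter (fun k => counts.getD k 0 == (((c0 :: rest).length : Nat) : Int)) := by
      rw [hC, PySem.Dict.items_eq_map_keys counts hnk 0]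
      exact pv_map_filter counts.keys (fun k => counts.getD k 0)
        (fun v => v == (((c0 :: rest).length : Nat) : Int))
    have hg : ∀ x : String, counts.getD x 0
        = (((c0 :: rest).countP (fun comp => decide (x ∈ PySem.Set.ofList (pvProps comp))) : Nat) : Int) := by
      intro x
      rw [hcounts, counts_getD]
      simp [PySem.Dict.getD_empty]
    have hmemC : ∀ x : String, x ∈ C ↔ ∀ comp ∈ (c0 :: rest), x ∈ PySem.Set.ofList (pvProps comp) := by
      intro x
      rw [hCfilter, List.mem_filter]
      constructor
      · rintro ⟨_, hb⟩
        rw [hg x] at hb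
        have hcount : (c0 :: rest).countP (fun comp => decide (x ∈ PySem.Set.ofList (pvProps comp)))
            = (c0 :: rest).length := by
          have := beq_iff_eq.mp hb
          exact_mod_cast this
        intro comp hcomp
        have := (List.countP_eq_length).mp hcount comp hcomp
        exact of_decide_eq_true this
      · intro hall
        constructor
        · rw [hcounts, counts_keys_mem]
          exact Or.inr ⟨c0, List.mem_cons_self, hall c0 List.mem_cons_self⟩
        · rw [hg x]
          have hcount : (c0 :: rest).countP (fun comp => decide (x ∈ PySem.Set.ofList (pvProps comp)))
              = (c0 :: rest).length :=
            List.countP_eq_length.mpr (fun comp hc => decide_eq_true (hall comp hc))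
          rw [hcount]
          exact beq_self_eq_true _
    have hmemS : ∀ x : String, x ∈ S ↔ ∀ comp ∈ (c0 :: rest), x ∈ PySem.Set.ofList (pvProps comp) := by
      intro x
      rw [hSdef, mem_foldl_inter]
      constructor
      · rintro ⟨h0, hr⟩ comp hc
        rcases List.mem_cons.mp hc with rfl | hc
        · exact h0
        · exact hr comp hc
      · intro hall
        exact ⟨hall c0 List.mem_cons_self, fun comp hc => hall comp (List.mem_cons_of_mem _ hc)⟩
    have hSnodup : S.Nodup := by
      rw [hSdef]
      exact nodup_foldl_inter _ _ (PySem.Set.nodup_ofList _)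
    have hCnodup : C.Nodup := by
      rw [hCfilter]
      exact hnk.filter _
    have hperm : C.Perm S :=
      (List.perm_ext_iff_of_nodup hCnodup hSnodup).mpr (fun x => by rw [hmemC x, hmemS x])
    have hsorted : PySem.List.sorted C (fun x => x) false = PySem.List.sorted S (fun x => x) false :=
      PySem.List.sorted_eq_sorted_of_perm C S (fun x => x) (fun _ _ h => h) hperm
    rw [hsorted]
    by_cases hE : S = []
    · have hs : PySem.List.sorted S (fun x => x) false = [] := by
        rw [PySem.List.sorted_eq_nil_iff]; exact hE
      rw [if_neg (by simp [hE]), if_neg (by simp [hs])]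
    · have hs : PySem.List.sorted S (fun x => x) false ≠ [] := by
        rw [ne_eq, PySem.List.sorted_eq_nil_iff]
        exact hE
      rw [if_pos hE, if_pos hs]
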